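-- pv_equiv track=rewrite | github.com/xu1718191411/AT_CODE_BEGINNER_SELECTION | CONTEXT_176/c.py | calculate
-- ===== SOURCE A (Python) =====
-- def calculate(n, arr):
--     currentHeight = arr[0]
--     result = 0
--     for i in range(1,n):
--         if arr[i] < currentHeight:
--             result += (currentHeight - arr[i])
--         else:
--             currentHeight = arr[i]
--
--     return result
-- ===== SOURCE B (Python) =====
-- def calculate(n, arr):
--     # Different algorithm: find the positions that are prefix records (at least as
--     # large as everything before them) by direct comparison -- no running maximum is
--     # maintained anywhere -- then sum the deficits segment by segment: every index
--     # between one record and the next is dominated by the earlier record's height.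
--     records = [i for i in range(n) if all(arr[j] <= arr[i] for j in range(i))]
--     records.append(n)
--     total = 0
--     for l, r in zip(records, records[1:]):
--         for i in range(l, r):
--             total += arr[l] - arr[i]
--     return total
-- ===== Notes on version B (the rewrite author's own statement) =====
-- stated objective: alternative
-- what changed: Replaced the fused running-max accumulator loop by a record/segment algorithm: first find the prefix-record positions by direct pairwise comparison (no running maximum anywhere), then sum the deficits of each segment against its leading record.
import Mathlib
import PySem

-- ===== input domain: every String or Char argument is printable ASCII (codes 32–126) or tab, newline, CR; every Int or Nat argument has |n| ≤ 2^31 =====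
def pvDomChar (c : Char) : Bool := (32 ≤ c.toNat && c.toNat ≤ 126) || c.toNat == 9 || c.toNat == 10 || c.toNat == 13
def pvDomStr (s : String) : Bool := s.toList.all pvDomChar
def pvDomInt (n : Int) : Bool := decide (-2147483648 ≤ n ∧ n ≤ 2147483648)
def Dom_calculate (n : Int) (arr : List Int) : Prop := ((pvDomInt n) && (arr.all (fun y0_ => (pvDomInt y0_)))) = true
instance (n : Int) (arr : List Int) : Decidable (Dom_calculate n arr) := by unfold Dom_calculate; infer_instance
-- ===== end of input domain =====

-- B replaces A's fused running-max loop by a record/segment algorithm (find prefix-record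
-- positions by direct comparison, then sum deficits per segment); alternative, not faster.

-- ===== PORT A =====
-- literal port of A: currentHeight = arr[0]; result = 0; for i in range(1,n): …
def calculate (n : Int) (arr : List Int) : Int :=
  (((PySem.List.pyRange 1 n 1).foldl
      (fun (st : Int × Int) i =>
        let x := PySem.List.pyGetD arr i 0
        if x < st.1 then (st.1, st.2 + (st.1 - x)) else (x, st.2))
      (PySem.List.pyGetD arr 0 0, 0))).2

-- ===== PORT B =====
-- literal port of Source B: records = [i for i in range(n) if all(arr[j] <= arr[i] for j in range(i))];
-- records.append(n); then for l, r in zip(records, records[1:]): for i in range(l, r): total += arr[l] - arr[i]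
def calculate_alt (n : Int) (arr : List Int) : Int :=
  let records :=
    ((PySem.List.pyRange 0 n 1).filter (fun i =>
      (PySem.List.pyRange 0 i 1).all (fun j =>
        decide (PySem.List.pyGetD arr j 0 ≤ PySem.List.pyGetD arr i 0)))) ++ [n]
  (records.zip (PySem.List.slice records (some 1) none)).foldl
    (fun total p =>
      (PySem.List.pyRange p.1 p.2 1).foldl
        (fun t i => t + (PySem.List.pyGetD arr p.1 0 - PySem.List.pyGetD arr i 0)) total)
    0

-- ===== PRECONDITION & SPEC =====
-- A raises IndexError when arr is empty (arr[0]) or when n exceeds len(arr); exactly those inputs are excluded.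
def Pre_calculate (n : Int) (arr : List Int) : Prop := arr ≠ [] ∧ n ≤ (arr.length : Int)
instance (n : Int) (arr : List Int) : Decidable (Pre_calculate n arr) := by unfold Pre_calculate; infer_instance
def pvWitness_calculate : Int × List Int := (4, [3, 1, 4, 1])

def Spec_calculate (n : Int) (arr : List Int) (out : Int) : Prop := out = calculate_alt n arr
instance (n : Int) (arr : List Int) (out : Int) : Decidable (Spec_calculate n arr out) := by unfold Spec_calculate; infer_instance

-- ===== CLAIM (what is proved, stated in full; the proofs are below) =====
def Claim_equal_calculate : Prop := ∀ (n : Int) (arr : List Int), Dom_calculate n arr → Pre_calculate n arr → Spec_calculate n arr (calculate n arr)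

-- ===== LEMMAS AND PROOFS =====

-- Nat-indexed views of the two programs (helpers for the proofs only)
def pvG (arr : List Int) (i : Nat) : Int := arr.getD i 0
def pvIsRec (arr : List Int) (i : Nat) : Bool := (List.range i).all (fun j => decide (pvG arr j ≤ pvG arr i))
def pvRecs (arr : List Int) (N : Nat) : List Nat := (List.range N).filter (pvIsRec arr)
def pvStep (arr : List Int) (st : Int × Int) (i : Nat) : Int × Int :=
  if pvG arr i < st.1 then (st.1, st.2 + (st.1 - pvG arr i)) else (pvG arr i, st.2)
def pvAA (arr : List Int) (N : Nat) : Int × Int := (List.range' 1 (N - 1)).foldl (pvStep arr) (pvG arr 0, 0)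
def pvSeg (arr : List Int) (l r : Nat) : Int := ((List.range' l (r - l)).map (fun i => pvG arr l - pvG arr i)).sum
def pvChain (arr : List Int) : List Nat → Nat → Int
  | [], _ => 0
  | [l], e => pvSeg arr l e
  | l :: r :: rest, e => pvSeg arr l r + pvChain arr (r :: rest) e

def pvCastL (rs : List Nat) : List Int := rs.map (fun a : Nat => (a : Int))

lemma pvCastL_nil : pvCastL [] = [] := rfl
lemma pvCastL_cons (a : Nat) (t : List Nat) : pvCastL (a :: t) = ((a : Nat) : Int) :: pvCastL t := rfl

lemma pvSeg_self (arr : List Int) (l : Nat) : pvSeg arr l l = 0 := by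
  simp [pvSeg]

lemma pvSeg_succ (arr : List Int) (l N : Nat) (h : l ≤ N) :
    pvSeg arr l (N + 1) = pvSeg arr l N + (pvG arr l - pvG arr N) := by
  unfold pvSeg
  have h1 : N + 1 - l = (N - l) + 1 := by omega
  rw [h1, List.range'_concat, List.map_append, List.sum_append]
  have h2 : l + (N - l) = N := by omega
  simp [h2]

lemma pvChain_snoc (arr : List Int) :
    ∀ (rs : List Nat) (m e : Nat), pvChain arr (rs ++ [m]) e = pvChain arr rs m + pvSeg arr m e := by
  intro rs
  induction rs with
  | nil => intro m e; simp [pvChain]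
  | cons a t ih =>
    intro m e
    cases t with
    | nil => simp [pvChain]
    | cons b t' =>
      have := ih m e
      simp only [List.cons_append, pvChain] at this ⊢
      rw [this]; ring

lemma pvChain_last_succ (arr : List Int) :
    ∀ (rs' : List Nat) (L N : Nat), L ≤ N →
      pvChain arr (rs' ++ [L]) (N + 1) = pvChain arr (rs' ++ [L]) N + (pvG arr L - pvG arr N) := by
  intro rs'
  induction rs' with
  | nil => intro L N h; simp [pvChain, pvSeg_succ arr L N h]
  | cons a t ih =>
    intro L N h
    cases t with
    | nil =>
      simp only [List.cons_append, List.nil_append, pvChain]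
      rw [pvSeg_succ arr L N h]; ring
    | cons b t' =>
      have := ih L N h
      simp only [List.cons_append, pvChain] at this ⊢
      rw [this]; ring

-- the main invariant: the record list of the first N indices is nonempty, its last element
-- carries A's running maximum, and the segment-chain sum equals A's accumulator
lemma pvMain (arr : List Int) : ∀ N : Nat, 1 ≤ N →
    ∃ rs' L, pvRecs arr N = rs' ++ [L] ∧ L < N ∧
      pvG arr L = (pvAA arr N).1 ∧
      pvChain arr (pvRecs arr N) N = (pvAA arr N).2 ∧
      (∀ j, j < N → pvG arr j ≤ (pvAA arr N).1) := by
  intro N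
  induction N with
  | zero => intro h; omega
  | succ N ih =>
    intro _
    by_cases hN : N = 0
    · subst hN
      refine ⟨[], 0, ?_, by omega, ?_, ?_, ?_⟩
      · simp [pvRecs, pvIsRec]
      · simp [pvAA]
      · simp [pvRecs, pvIsRec, pvChain, pvAA, pvSeg]
      · intro j hj; interval_cases j; simp [pvAA]
    · obtain ⟨rs', L, hrecs, hL, hg, hchain, hmax⟩ := ih (by omega)
      have hAA : pvAA arr (N + 1) = pvStep arr (pvAA arr N) N := by
        unfold pvAA
        have h1 : N + 1 - 1 = (N - 1) + 1 := by omega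
        rw [h1, List.range'_concat, List.foldl_append]
        have h2 : 1 + (N - 1) = N := by omega
        simp [h2]
      have hrecs1 : pvRecs arr (N + 1) = pvRecs arr N ++ (if pvIsRec arr N then [N] else []) := by
        unfold pvRecs
        rw [List.range_succ, List.filter_append]
        congr 1
        cases h : pvIsRec arr N <;> simp [List.filter, h]
      by_cases hrec : pvIsRec arr N = true
      · -- N is a new record: A takes the else branch (arr[N] >= current max)
        have hle : ∀ j, j < N → pvG arr j ≤ pvG arr N := by
          intro j hj
          have := (List.all_eq_true.mp hrec) j (List.mem_range.mpr hj)
          exact of_decide_eq_true this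
        have hnotlt : ¬ pvG arr N < (pvAA arr N).1 := by
          have := hle L hL
          rw [hg] at this; omega
        have hstep : pvAA arr (N + 1) = (pvG arr N, (pvAA arr N).2) := by
          rw [hAA]; unfold pvStep; rw [if_neg hnotlt]
        refine ⟨rs' ++ [L], N, ?_, by omega, by rw [hstep], ?_, ?_⟩
        · rw [hrecs1, hrec, hrecs]; simp
        · rw [hrecs1, hrec, if_pos rfl, pvChain_snoc, hchain, hstep, pvSeg_succ arr N N le_rfl,
            pvSeg_self]
          ring
        · intro j hj
          rw [hstep]
          rcases Nat.lt_succ_iff_lt_or_eq.mp hj with h | h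
          · exact hle j h
          · subst h; exact le_rfl
      · -- N is not a record: some earlier element exceeds it, A takes the deficit branch
        have hex : ∃ j, j < N ∧ pvG arr N < pvG arr j := by
          have hrec' : ¬ ∀ j ∈ List.range N, decide (pvG arr j ≤ pvG arr N) = true := by
            simpa [pvIsRec, List.all_eq_true] using hrec
          rcases not_forall.mp hrec' with ⟨j, hj⟩
          rcases Classical.not_imp.mp hj with ⟨hmem, hd⟩
          refine ⟨j, List.mem_range.mp hmem, ?_⟩
          have : ¬ pvG arr j ≤ pvG arr N := by simpa using hd
          omega
        obtain ⟨j, hjN, hjgt⟩ := hex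
        have hlt : pvG arr N < (pvAA arr N).1 := lt_of_lt_of_le hjgt (hmax j hjN)
        have hstep : pvAA arr (N + 1) = ((pvAA arr N).1, (pvAA arr N).2 + ((pvAA arr N).1 - pvG arr N)) := by
          rw [hAA]; unfold pvStep; rw [if_pos hlt]
        have hrecF : pvIsRec arr N = false := by simpa using hrec
        have hrecs2 : pvRecs arr (N + 1) = rs' ++ [L] := by
          rw [hrecs1, hrecF]; simp [hrecs]
        refine ⟨rs', L, hrecs2, by omega, by rw [hstep, ← hg], ?_, ?_⟩
        · rw [hrecs2, pvChain_last_succ arr rs' L N (by omega), ← hrecs, hchain, hstep, hg]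
        · intro j' hj'
          rw [hstep]
          rcases Nat.lt_succ_iff_lt_or_eq.mp hj' with h | h
          · exact hmax j' h
          · subst h; omega

-- A's port equals the Nat-indexed accumulator view
lemma calcA_eq (arr : List Int) (n : Int) (h1 : 1 ≤ n) :
    calculate n arr = (pvAA arr n.toNat).2 := by
  unfold calculate pvAA
  rw [PySem.List.pyRange_one, List.foldl_map]
  have hr : List.range' 1 (n.toNat - 1) = (List.range (n.toNat - 1)).map (fun k => 1 + k) := by
    rw [List.range'_eq_map_range]
  rw [hr, List.foldl_map]
  have hm : (n - 1).toNat = n.toNat - 1 := by omega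
  rw [hm]
  have hfun : (fun (st : Int × Int) (k : Nat) =>
      let x := PySem.List.pyGetD arr (1 + (k : Int)) 0
      if x < st.1 then (st.1, st.2 + (st.1 - x)) else (x, st.2))
      = (fun (st : Int × Int) (k : Nat) => pvStep arr st (1 + k)) := by
    funext st k
    have hc : (1 : Int) + (k : Int) = ((1 + k : Nat) : Int) := by push_cast; ring
    simp only [hc, PySem.List.pyGetD_natCast, pvStep, pvG]
  rw [hfun]
  congr 1
  simp [PySem.List.pyGetD_zero, pvG]

-- the inner 'for i in range(l, r)' loop of B sums one segment
lemma innerB_eq (arr : List Int) (l r : Nat) (t : Int) :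
    (PySem.List.pyRange (l : Int) (r : Int) 1).foldl
      (fun t i => t + (PySem.List.pyGetD arr (l : Int) 0 - PySem.List.pyGetD arr i 0)) t
      = t + pvSeg arr l r := by
  rw [PySem.List.pyRange_one, List.foldl_map]
  have hm : ((r : Int) - (l : Int)).toNat = r - l := by omega
  rw [hm]
  have hfun : (fun (t : Int) (k : Nat) =>
      t + (PySem.List.pyGetD arr (l : Int) 0 - PySem.List.pyGetD arr ((l : Int) + (k : Int)) 0))
      = (fun (t : Int) (k : Nat) => t + (pvG arr l - pvG arr (l + k))) := by
    funext t k
    have hc : (l : Int) + (k : Int) = ((l + k : Nat) : Int) := by push_cast; ring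
    simp only [hc, PySem.List.pyGetD_natCast, pvG]
  rw [hfun, PySem.List.foldl_add]
  unfold pvSeg
  rw [List.range'_eq_map_range, List.map_map]
  rfl

-- the zip-of-consecutive-pairs fold of B computes the segment chain
lemma zipFoldB_eq (arr : List Int) :
    ∀ (rs : List Nat) (e : Nat) (t : Int),
      (((pvCastL rs ++ [((e : Nat) : Int)]).zip
          ((pvCastL rs ++ [((e : Nat) : Int)]).tail)).foldl
        (fun total (p : Int × Int) =>
          (PySem.List.pyRange p.1 p.2 1).foldl
            (fun t i => t + (PySem.List.pyGetD arr p.1 0 - PySem.List.pyGetD arr i 0)) total) t)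
      = t + pvChain arr rs e := by
  intro rs
  induction rs with
  | nil => intro e t; simp [pvCastL_nil, pvChain]
  | cons a t' ih =>
    intro e t
    cases t' with
    | nil =>
      simp only [pvCastL_cons, pvCastL_nil, List.nil_append, List.cons_append, List.tail_cons,
        List.zip_cons_cons, List.zip_nil_right, List.foldl_cons, List.foldl_nil, pvChain]
      exact innerB_eq arr a e t
    | cons b t'' =>
      simp only [pvCastL_cons, List.cons_append, List.tail_cons, List.zip_cons_cons,
        List.foldl_cons]
      have := ih e (t + pvSeg arr a b)
      simp only [pvCastL_cons, List.cons_append, List.tail_cons] at this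
      rw [innerB_eq arr a b t, this]
      have hch : pvChain arr (a :: b :: t'') e = pvSeg arr a b + pvChain arr (b :: t'') e := rfl
      rw [hch]; ring

-- B's record comprehension equals the Nat-indexed record list
lemma predB_eq (arr : List Int) (k : Nat) :
    ((PySem.List.pyRange 0 (k : Int) 1).all (fun j =>
        decide (PySem.List.pyGetD arr j 0 ≤ PySem.List.pyGetD arr (k : Int) 0)))
      = pvIsRec arr k := by
  unfold pvIsRec
  rw [PySem.List.pyRange_one, List.all_map]
  simp only [sub_zero, Int.toNat_natCast]
  congr 1
  funext j
  simp [Function.comp, PySem.List.pyGetD_natCast, pvG]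

-- B's record comprehension equals the Nat-indexed record list
lemma recordsB_eq (arr : List Int) (n : Int) (h0 : 0 ≤ n) :
    (PySem.List.pyRange 0 n 1).filter (fun i =>
        (PySem.List.pyRange 0 i 1).all (fun j =>
          decide (PySem.List.pyGetD arr j 0 ≤ PySem.List.pyGetD arr i 0)))
      = pvCastL (pvRecs arr n.toNat) := by
  rw [PySem.List.pyRange_one]
  have h00 : (fun k : Nat => (0 : Int) + (k : Int)) = (fun k : Nat => ((k : Nat) : Int)) := by
    funext k; ring
  rw [h00, List.filter_map]
  have hm : (n - 0).toNat = n.toNat := by omega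
  rw [hm]
  unfold pvRecs pvCastL
  refine congrArg (List.map _) (List.filter_congr ?_)
  intro k _
  simp only [Function.comp]
  exact predB_eq arr k

-- ===== VERDICT (by name: the statement is the Claim_ definition above) =====
theorem calculate_spec : Claim_equal_calculate := by
  intro n arr _ hpre
  obtain ⟨hne, hlen⟩ := hpre
  unfold Spec_calculate
  by_cases hn : n ≤ 0
  · unfold calculate calculate_alt
    rw [PySem.List.pyRange_one_eq_nil (by omega : n ≤ 1),
      PySem.List.pyRange_one_eq_nil hn]
    simp [PySem.List.slice_from_one]
  · have h1 : 1 ≤ n := by omega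
    obtain ⟨rs', L, hrecs, hL, hg, hchain, hmax⟩ := pvMain arr n.toNat (by omega)
    rw [calcA_eq arr n h1]
    unfold calculate_alt
    simp only [PySem.List.slice_from_one, recordsB_eq arr n (by omega)]
    have hcast : (n : Int) = ((n.toNat : Nat) : Int) := by omega
    rw [hcast]
    simp only [Int.toNat_natCast]
    rw [zipFoldB_eq arr (pvRecs arr n.toNat) n.toNat 0, hchain]
    ring
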